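-- pv_equiv track=rewrite | github.com/erwanlecarpentier/IICGP.jl | py-graph.py | get_output_nodes_labels
-- ===== SOURCE A (Python) =====
-- OUT_INCR = 100 # increment for outputs's nodes names
--
-- def get_output_nodes_labels(G, outputs):
-- 	out = []
-- 	for i in range(len(outputs)):
-- 		out_i = outputs[i] + OUT_INCR
-- 		while out_i in out:
-- 			out_i += 1
-- 		out.append(out_i)
-- 	return out
-- ===== SOURCE B (Python) =====
-- OUT_INCR = 100 # increment for outputs's nodes names
--
-- def get_output_nodes_labels(G, outputs):
--     # Union-find style "next free label" structure: nxt maps a reserved label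
--     # to a candidate for the next free label; following the chain (with path
--     # compression) finds the smallest free label >= base in near-constant
--     # amortized time, instead of re-scanning the output list.
--     nxt = {}
--     out = []
--     for o in outputs:
--         x = o + OUT_INCR
--         path = []
--         while x in nxt:
--             path.append(x)
--             x = nxt[x]
--         for p in path:          # path compression
--             nxt[p] = x
--         out.append(x)
--         nxt[x] = x + 1          # reserve x; next candidate after x is x+1
--     return out
-- ===== Notes on version B (the rewrite author's own statement) =====
-- stated objective: faster
-- what changed: Replaces the linear re-scan of the output list for every candidate label with a union-find 'next free label' dictionary with path compression: each base label follows (and compresses) a chain to the smallest free label, which is then reserved by pointing it at its successor.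
import Mathlib
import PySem

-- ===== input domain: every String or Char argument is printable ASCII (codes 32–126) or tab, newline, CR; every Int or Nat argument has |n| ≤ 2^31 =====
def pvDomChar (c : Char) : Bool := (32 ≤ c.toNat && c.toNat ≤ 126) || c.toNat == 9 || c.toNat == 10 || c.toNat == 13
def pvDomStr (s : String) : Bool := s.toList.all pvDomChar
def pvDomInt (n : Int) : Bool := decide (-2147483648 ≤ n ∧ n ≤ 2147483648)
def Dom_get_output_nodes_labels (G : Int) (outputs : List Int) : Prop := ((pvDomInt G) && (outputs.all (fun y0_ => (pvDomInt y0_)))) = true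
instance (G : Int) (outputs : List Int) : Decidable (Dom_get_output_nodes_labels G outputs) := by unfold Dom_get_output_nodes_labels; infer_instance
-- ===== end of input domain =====

-- B replaces A's per-candidate linear scan of the output list with a "next free label"
-- dictionary with path compression (union-find style); objective: faster.


-- ===== PORT A =====
-- termination lemma for A's `while out_i in out` loop (the probed value is bumped past
-- one occurrence, so the count of elements ≥ out_i strictly drops)
theorem pvCountP_lt_of_mem (l : List Int) (x y : Int) (hxy : x < y) (hx : x ∈ l) :
    l.countP (fun k => decide (y ≤ k)) < l.countP (fun k => decide (x ≤ k)) := by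
  induction l with
  | nil => cases hx
  | cons a t ih =>
    rcases List.mem_cons.mp hx with rfl | hm
    · simp only [List.countP_cons]
      have h1 : t.countP (fun k => decide (y ≤ k)) ≤ t.countP (fun k => decide (x ≤ k)) := by
        apply List.countP_mono_left
        intro b _ hb
        simp only [decide_eq_true_eq] at *
        omega
      by_cases h2 : y ≤ x
      · omega
      · simp [h2]
        omega
    · have := ih hm
      simp only [List.countP_cons]
      by_cases h2 : y ≤ a <;> by_cases h3 : x ≤ a <;> simp [h2, h3] <;> omega

-- the `while out_i in out: out_i += 1` loop of A
def probeA (out : List Int) (x : Int) : Int :=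
  if h : out.contains x then probeA out (x + 1) else x
termination_by out.countP (fun k => decide (x ≤ k))
decreasing_by
  exact pvCountP_lt_of_mem out x (x + 1) (by omega) (List.contains_iff_mem.mp h)

def get_output_nodes_labels (G : Int) (outputs : List Int) : List Int :=
  outputs.foldl (fun out o => out ++ [probeA out (o + 100)]) []

-- ===== PORT B =====
-- the `while x in nxt: path.append(x); x = nxt[x]` loop of B; the chain is strictly
-- increasing through distinct keys of nxt, so fuel nxt.size + 1 is sufficient
-- (proved below: pvWalkB_spec is only ever applied with enough fuel)
def pvWalkB (nxt : PySem.Dict Int Int) : Nat → Int → Int × List Int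
  | 0, x => (x, [])
  | fuel + 1, x =>
    match nxt.get? x with
    | none => (x, [])
    | some y =>
      let r := pvWalkB nxt fuel y
      (r.1, x :: r.2)

-- one iteration of B's `for o in outputs` loop
def pvStepB (st : List Int × PySem.Dict Int Int) (o : Int) : List Int × PySem.Dict Int Int :=
  let r := pvWalkB st.2 (st.2.size + 1) (o + 100)
  let nxt1 := r.2.foldl (fun d p => d.insert p r.1) st.2
  (st.1 ++ [r.1], nxt1.insert r.1 (r.1 + 1))

def get_output_nodes_labels_alt (G : Int) (outputs : List Int) : List Int :=
  (outputs.foldl pvStepB ([], PySem.Dict.empty)).1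

-- ===== PRECONDITION & SPEC =====
def Spec_get_output_nodes_labels (G : Int) (outputs : List Int) (out : List Int) : Prop := out = get_output_nodes_labels_alt G outputs
instance (G : Int) (outputs : List Int) (out : List Int) : Decidable (Spec_get_output_nodes_labels G outputs out) := by unfold Spec_get_output_nodes_labels; infer_instance

-- ===== CLAIM (what is proved, stated in full; the proofs are below) =====
def Claim_equal_get_output_nodes_labels : Prop := ∀ (G : Int) (outputs : List Int), Dom_get_output_nodes_labels G outputs → Spec_get_output_nodes_labels G outputs (get_output_nodes_labels G outputs)

-- ===== LEMMAS AND PROOFS =====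

-- invariant on B's dictionary: every entry k ↦ v points strictly forward and the
-- whole interval [k, v) is occupied (is a key)
def DInv (nxt : PySem.Dict Int Int) : Prop :=
  ∀ k v, nxt.get? k = some v → k < v ∧ ∀ m, k ≤ m → m < v → nxt.contains m = true

-- characterization of A's probe: smallest free value ≥ x
theorem probeA_spec_aux (out : List Int) : ∀ (n : Nat) (x : Int),
    out.countP (fun k => decide (x ≤ k)) ≤ n →
    x ≤ probeA out x ∧ out.contains (probeA out x) = false ∧
      ∀ m, x ≤ m → m < probeA out x → out.contains m = true := by
  intro n
  induction n with
  | zero =>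
    intro x hx
    by_cases h : out.contains x = true
    · exfalso
      have : 0 < out.countP (fun k => decide (x ≤ k)) :=
        List.countP_pos_iff.mpr ⟨x, List.contains_iff_mem.mp h, by simp⟩
      omega
    · rw [probeA.eq_def, dif_neg h]
      exact ⟨le_refl x, by simpa using h, fun m h1 h2 => absurd h2 (by omega)⟩
  | succ n ih =>
    intro x hx
    by_cases h : out.contains x = true
    · have hlt := pvCountP_lt_of_mem out x (x + 1) (by omega) (List.contains_iff_mem.mp h)
      obtain ⟨i1, i2, i3⟩ := ih (x + 1) (by omega)
      rw [probeA.eq_def, dif_pos h]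
      refine ⟨by omega, i2, ?_⟩
      intro m hm1 hm2
      rcases eq_or_lt_of_le hm1 with rfl | h'
      · exact h
      · exact i3 m (by omega) hm2
    · rw [probeA.eq_def, dif_neg h]
      exact ⟨le_refl x, by simpa using h, fun m h1 h2 => absurd h2 (by omega)⟩

theorem probeA_spec (out : List Int) (x : Int) :
    x ≤ probeA out x ∧ out.contains (probeA out x) = false ∧
      ∀ m, x ≤ m → m < probeA out x → out.contains m = true :=
  probeA_spec_aux out (out.countP (fun k => decide (x ≤ k))) x (le_refl _)

-- the "smallest free value ≥ x" is unique
theorem free_unique (P : Int → Bool) (x z1 z2 : Int)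
    (h1 : x ≤ z1) (h2 : P z1 = false) (h3 : ∀ m, x ≤ m → m < z1 → P m = true)
    (h4 : x ≤ z2) (h5 : P z2 = false) (h6 : ∀ m, x ≤ m → m < z2 → P m = true) :
    z1 = z2 := by
  rcases lt_trichotomy z1 z2 with h | h | h
  · have := h6 z1 h1 h
    rw [h2] at this; cases this
  · exact h
  · have := h3 z2 h4 h
    rw [h5] at this; cases this

-- characterization of B's chain walk, given enough fuel
theorem pvWalkB_spec (nxt : PySem.Dict Int Int) (hinv : DInv nxt) (fuel : Nat) :
    ∀ x : Int, nxt.keys.countP (fun k => decide (x ≤ k)) < fuel →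
      x ≤ (pvWalkB nxt fuel x).1 ∧ nxt.contains (pvWalkB nxt fuel x).1 = false ∧
      (∀ m, x ≤ m → m < (pvWalkB nxt fuel x).1 → nxt.contains m = true) ∧
      (∀ p ∈ (pvWalkB nxt fuel x).2, x ≤ p ∧ p < (pvWalkB nxt fuel x).1) := by
  induction fuel with
  | zero => intro x hx; omega
  | succ fuel ih =>
    intro x hx
    cases hg : nxt.get? x with
    | none =>
      simp only [pvWalkB, hg]
      refine ⟨le_refl x, ?_, fun m h1 h2 => by omega, by simp⟩
      rw [PySem.Dict.contains_eq_isSome_get?, hg]; rfl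
    | some y =>
      have hxy : x < y := (hinv x y hg).1
      have hseg : ∀ m, x ≤ m → m < y → nxt.contains m = true := (hinv x y hg).2
      have hxk : nxt.contains x = true := by
        rw [PySem.Dict.contains_eq_isSome_get?, hg]; rfl
      have hxmem : x ∈ nxt.keys := (PySem.Dict.contains_iff_mem_keys nxt x).mp hxk
      have hcount : nxt.keys.countP (fun k => decide (y ≤ k)) < fuel := by
        have := pvCountP_lt_of_mem nxt.keys x y hxy hxmem
        omega
      obtain ⟨ih1, ih2, ih3, ih4⟩ := ih y hcount
      simp only [pvWalkB, hg]
      refine ⟨by omega, ih2, ?_, ?_⟩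
      · intro m h1 h2
        by_cases hm : m < y
        · exact hseg m h1 hm
        · exact ih3 m (by omega) h2
      · intro p hp
        rcases List.mem_cons.mp hp with rfl | hp'
        · exact ⟨le_refl p, by omega⟩
        · have := ih4 p hp'
          exact ⟨by omega, this.2⟩

-- get? through B's path-compression foldl (all inserts write the same value)
theorem get?_foldl_insert_const (l : List Int) (c : Int) (d : PySem.Dict Int Int) (k : Int) :
    ((l.foldl (fun d p => d.insert p c) d).get? k) = if k ∈ l then some c else d.get? k := by
  induction l generalizing d with
  | nil => simp
  | cons a t ih =>
    simp only [List.foldl_cons, ih, List.mem_cons]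
    by_cases h1 : k ∈ t
    · simp [h1]
    · by_cases h2 : k = a <;> simp [h1, h2, PySem.Dict.get?_insert]

theorem contains_foldl_insert_const (l : List Int) (c : Int) (d : PySem.Dict Int Int) (k : Int) :
    ((l.foldl (fun d p => d.insert p c) d).contains k)
      = (decide (k ∈ l) || d.contains k) := by
  rw [PySem.Dict.contains_eq_isSome_get?, get?_foldl_insert_const,
      PySem.Dict.contains_eq_isSome_get?]
  by_cases h : k ∈ l <;> simp [h]

-- one parallel step preserves the simulation invariant
theorem step_sim (out : List Int) (nxt : PySem.Dict Int Int) (o : Int)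
    (hmem : ∀ m : Int, out.contains m = nxt.contains m) (hinv : DInv nxt) :
    (out ++ [probeA out (o + 100)] = (pvStepB (out, nxt) o).1) ∧
    (∀ m : Int, (out ++ [probeA out (o + 100)]).contains m = (pvStepB (out, nxt) o).2.contains m) ∧
    DInv (pvStepB (out, nxt) o).2 := by
  have hfuel : nxt.keys.countP (fun k => decide ((o + 100) ≤ k)) < nxt.size + 1 := by
    have := List.countP_le_length (l := nxt.keys) (p := fun k => decide ((o + 100) ≤ k))
    have hsz : nxt.keys.length = nxt.size := by
      simp [PySem.Dict.keys, PySem.Dict.size]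
    omega
  obtain ⟨w1, w2, w3, w4⟩ := pvWalkB_spec nxt hinv (nxt.size + 1) (o + 100) hfuel
  set r := pvWalkB nxt (nxt.size + 1) (o + 100) with hr
  obtain ⟨p1, p2, p3⟩ := probeA_spec out (o + 100)
  -- the two labels coincide
  have hz : probeA out (o + 100) = r.1 :=
    free_unique (fun m => out.contains m) (o + 100) (probeA out (o + 100)) r.1 p1 p2 p3 w1
      (by show out.contains r.1 = false; rw [hmem]; exact w2)
      (fun m h1 h2 => by show out.contains m = true; rw [hmem]; exact w3 m h1 h2)
  -- path elements are keys of nxt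
  have hpathkey : ∀ p ∈ r.2, nxt.contains p = true := by
    intro p hp
    exact w3 p (w4 p hp).1 (w4 p hp).2
  -- contains in the new dictionary
  have hcont : ∀ m : Int, (pvStepB (out, nxt) o).2.contains m
      = ((m == r.1) || nxt.contains m) := by
    intro m
    show ((r.2.foldl (fun d p => d.insert p r.1) nxt).insert r.1 (r.1 + 1)).contains m = _
    rw [PySem.Dict.contains_insert, contains_foldl_insert_const]
    by_cases h1 : m ∈ r.2
    · simp [h1, hpathkey m h1]
    · simp [h1]
  refine ⟨by rw [hz]; rfl, ?_, ?_⟩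
  · intro m
    rw [hcont m, ← hz]
    by_cases h1 : m = probeA out (o + 100)
    · subst h1
      simp
    · have h2 : (m == probeA out (o + 100)) = false := by simp [h1]
      simp only [List.contains_append, List.contains_cons, List.contains_nil, h2,
        Bool.or_false, hmem m, Bool.or_comm]
  · intro k v hkv
    rw [show (pvStepB (out, nxt) o).2
          = (r.2.foldl (fun d p => d.insert p r.1) nxt).insert r.1 (r.1 + 1) from rfl,
        PySem.Dict.get?_insert, ] at hkv
    by_cases hk : k = r.1
    · rw [if_pos hk] at hkv
      obtain rfl : r.1 + 1 = v := Option.some.inj hkv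
      refine ⟨by omega, ?_⟩
      intro m h1 h2
      rw [hcont m]
      have : m = r.1 := by omega
      simp [this]
    · rw [if_neg hk, get?_foldl_insert_const] at hkv
      by_cases hp : k ∈ r.2
      · rw [if_pos hp] at hkv
        obtain rfl : r.1 = v := Option.some.inj hkv
        refine ⟨(w4 k hp).2, ?_⟩
        intro m h1 h2
        rw [hcont m]
        have hm : nxt.contains m = true := w3 m (by have := (w4 k hp).1; omega) h2
        simp [hm]
      · rw [if_neg hp] at hkv
        obtain ⟨hlt, hseg⟩ := hinv k v hkv
        refine ⟨hlt, ?_⟩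
        intro m h1 h2
        rw [hcont m]
        simp [hseg m h1 h2]

-- main simulation over the outputs list
theorem main_sim (outputs : List Int) (out : List Int) (nxt : PySem.Dict Int Int)
    (hmem : ∀ m : Int, out.contains m = nxt.contains m) (hinv : DInv nxt) :
    outputs.foldl (fun out o => out ++ [probeA out (o + 100)]) out
      = (outputs.foldl pvStepB (out, nxt)).1 := by
  induction outputs generalizing out nxt with
  | nil => rfl
  | cons o rest ih =>
    obtain ⟨h1, h2, h3⟩ := step_sim out nxt o hmem hinv
    simp only [List.foldl_cons]
    rw [h1] at h2 ⊢
    exact ih _ _ h2 h3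

-- ===== VERDICT (by name: the statement is the Claim_ definition above) =====
theorem get_output_nodes_labels_spec : Claim_equal_get_output_nodes_labels := by
  intro G outputs _
  show get_output_nodes_labels G outputs = get_output_nodes_labels_alt G outputs
  unfold get_output_nodes_labels get_output_nodes_labels_alt
  apply main_sim
  · intro m; simp
  · intro k v hkv; simp at hkv
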